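-- pv_equiv track=rewrite | github.com/wseungjin/codingTest | naver/2021/1.py | solution
-- ===== SOURCE A (Python) =====
-- def solution(m,k):
--     kCount = 0
--     answer = ""
--     for index in range(len(m)):
--         if kCount >= len(k):
--             answer = answer + m[index:]
--             break
--         elif m[index] == k[kCount]:
--             kCount = kCount + 1
--         else :
--             answer = answer + m[index]
--     return answer
-- ===== SOURCE B (Python) =====
-- def solution(m, k):
--     # Two passes: greedy-match k as a subsequence of m collecting the matched
--     # indices into a set, then join the unmatched characters.
--     p = 0
--     matched = set()
--     for i, c in enumerate(m):
--         if p < len(k) and c == k[p]: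
--             matched.add(i)
--             p += 1
--     return ''.join(c for i, c in enumerate(m) if i not in matched)
-- ===== Notes on version B (the rewrite author's own statement) =====
-- stated objective: alternative
-- what changed: Replaces A's single interleaved loop (pointer + growing answer string + break-with-tail-append) by two separate passes: a greedy scan that records the matched indices in a set, then a join of the characters whose index was not matched.
import Mathlib
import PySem

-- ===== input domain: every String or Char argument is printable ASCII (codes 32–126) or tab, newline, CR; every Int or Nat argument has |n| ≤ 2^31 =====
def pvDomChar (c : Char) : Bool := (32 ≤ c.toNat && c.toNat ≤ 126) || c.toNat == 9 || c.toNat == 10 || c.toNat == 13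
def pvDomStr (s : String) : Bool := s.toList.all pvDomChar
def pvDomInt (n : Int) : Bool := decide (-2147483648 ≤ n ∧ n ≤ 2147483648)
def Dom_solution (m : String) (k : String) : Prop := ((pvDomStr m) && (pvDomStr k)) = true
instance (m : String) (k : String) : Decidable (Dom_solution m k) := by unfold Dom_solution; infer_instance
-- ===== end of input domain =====

-- B removes the greedy subsequence match of k from m in two passes (index set, then join)
-- instead of A's single interleaved loop; alternative decomposition, return values identical.

-- ===== PORT A =====
-- A's loop over range(len(m)) with state (kCount, answer); 'break' after appending m[index:]
-- is the early return.  index and kCount stay in range where used, so getD is exact, and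
-- m[index:] with index ≥ 0 is exactly List.drop.
def pvALoop (ms ks : List Char) (index kCount : Nat) (answer : List Char) : List Char :=
  if _h : index < ms.length then
    if kCount ≥ ks.length then answer ++ ms.drop index
    else if ms.getD index ' ' = ks.getD kCount ' ' then
      pvALoop ms ks (index + 1) (kCount + 1) answer
    else
      pvALoop ms ks (index + 1) kCount (answer ++ [ms.getD index ' '])
  else answer
termination_by ms.length - index

def solution (m : String) (k : String) : String :=
  String.ofList (pvALoop m.toList k.toList 0 0 [])

-- ===== PORT B =====
-- first pass of Source B: walk m with pointer p into k, collecting matched indices into a set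
def pvBScan (cs ks : List Char) (i : Int) (p : Nat) (acc : PySem.Set Int) : PySem.Set Int :=
  match cs with
  | [] => acc
  | c :: rest =>
    if p < ks.length ∧ c = ks.getD p ' ' then
      pvBScan rest ks (i + 1) (p + 1) (acc.add i)
    else
      pvBScan rest ks (i + 1) p acc

def solution_alt (m : String) (k : String) : String :=
  let cs := m.toList
  let matched := pvBScan cs k.toList 0 0 PySem.Set.empty
  String.ofList ((PySem.List.enumerate cs).filterMap
    (fun ic => if PySem.Set.contains matched ic.1 then none else some ic.2))

-- ===== PRECONDITION & SPEC =====
def Spec_solution (m : String) (k : String) (out : String) : Prop := out = solution_alt m k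
instance (m : String) (k : String) (out : String) : Decidable (Spec_solution m k out) := by unfold Spec_solution; infer_instance

-- ===== CLAIM (what is proved, stated in full; the proofs are below) =====
def Claim_equal_solution : Prop := ∀ (m : String) (k : String), Dom_solution m k → Spec_solution m k (solution m k)

-- ===== LEMMAS AND PROOFS =====

-- the common value: m with the greedy subsequence match of k removed
def pvRem : List Char → List Char → List Char
  | [], _ => []
  | cs, [] => cs
  | c :: cs, d :: ds => if c = d then pvRem cs ds else c :: pvRem cs (d :: ds)

lemma pvRem_nil_right (cs : List Char) : pvRem cs [] = cs := by
  cases cs <;> simp [pvRem]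

lemma pvALoop_eq (ms ks : List Char) (index kCount : Nat) (answer : List Char) :
    pvALoop ms ks index kCount answer = answer ++ pvRem (ms.drop index) (ks.drop kCount) := by
  induction index, kCount, answer using pvALoop.induct ms ks with
  | case1 index kCount answer h hk =>
    rw [pvALoop]
    simp only [dif_pos h, if_pos hk]
    rw [List.drop_eq_nil_of_le hk, pvRem_nil_right]
  | case2 index kCount answer h hk heq ih =>
    have hk' : kCount < ks.length := by omega
    have heq' : ms[index] = ks[kCount] := by
      rwa [List.getD_eq_getElem _ _ h, List.getD_eq_getElem _ _ hk'] at heq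
    rw [pvALoop]
    simp only [dif_pos h, if_neg hk, if_pos heq]
    rw [ih, List.drop_eq_getElem_cons h, List.drop_eq_getElem_cons hk']
    simp [pvRem, heq']
  | case3 index kCount answer h hk hne ih =>
    have hk' : kCount < ks.length := by omega
    have hne' : ms[index] ≠ ks[kCount] := by
      rwa [List.getD_eq_getElem _ _ h, List.getD_eq_getElem _ _ hk'] at hne
    rw [pvALoop]
    simp only [dif_pos h, if_neg hk, if_neg hne]
    rw [ih, List.drop_eq_getElem_cons h, List.drop_eq_getElem_cons hk']
    simp only [pvRem, if_neg hne', List.append_assoc, List.cons_append, List.nil_append]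
    rw [List.getD_eq_getElem _ _ h]
  | case4 index kCount answer h =>
    rw [pvALoop]
    simp only [dif_neg h]
    rw [List.drop_eq_nil_of_le (by omega), pvRem]
    simp

lemma mem_pvBScan (cs ks : List Char) :
    ∀ i p acc j, j ∈ pvBScan cs ks i p acc → j ∈ acc ∨ i ≤ j := by
  induction cs with
  | nil => intro i p acc j hj; exact Or.inl hj
  | cons c rest ih =>
    intro i p acc j hj
    rw [pvBScan] at hj
    split at hj
    · rcases ih (i+1) (p+1) (acc.add i) j hj with h | h
      · rcases (PySem.Set.mem_add acc i j).mp h with h' | h'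
        · exact Or.inl h'
        · exact Or.inr (le_of_eq h'.symm)
      · exact Or.inr (by omega)
    · rcases ih (i+1) p acc j hj with h | h
      · exact Or.inl h
      · exact Or.inr (by omega)

lemma pvBScan_mono (cs ks : List Char) :
    ∀ i p acc j, j ∈ acc → j ∈ pvBScan cs ks i p acc := by
  induction cs with
  | nil => intro i p acc j hj; exact hj
  | cons c rest ih =>
    intro i p acc j hj
    rw [pvBScan]
    split
    · exact ih _ _ _ _ ((PySem.Set.mem_add acc i j).mpr (Or.inl hj))
    · exact ih _ _ _ _ hj

lemma pvBScan_filter (cs ks : List Char) :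
    ∀ i p acc, (∀ j ∈ acc, j < i) →
      (PySem.List.enumerate cs i).filterMap
        (fun ic => if PySem.Set.contains (pvBScan cs ks i p acc) ic.1 then none else some ic.2)
      = pvRem cs (ks.drop p) := by
  induction cs with
  | nil => intro i p acc _; simp [PySem.List.enumerate_nil, pvRem]
  | cons c rest ih =>
    intro i p acc hacc
    rw [PySem.List.enumerate_cons, List.filterMap_cons, pvBScan]
    by_cases hm : p < ks.length ∧ c = ks.getD p ' '
    · rw [if_pos hm]
      have hk' : p < ks.length := hm.1
      have hmem : i ∈ pvBScan rest ks (i+1) (p+1) (acc.add i) :=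
        pvBScan_mono _ _ _ _ _ _ ((PySem.Set.mem_add acc i i).mpr (Or.inr rfl))
      have hcon : PySem.Set.contains (pvBScan rest ks (i+1) (p+1) (acc.add i)) i = true :=
        (PySem.Set.contains_iff _ _).mpr hmem
      simp only [hcon, if_true]
      rw [ih (i+1) (p+1) (acc.add i)
        (by intro j hj; rcases (PySem.Set.mem_add acc i j).mp hj with h | h
            · exact lt_trans (hacc j h) (by omega)
            · omega)]
      rw [List.drop_eq_getElem_cons hk', pvRem]
      have h2 := hm.2
      have : c = ks[p] := by rwa [List.getD_eq_getElem _ _ hk'] at h2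
      simp [this]
    · rw [if_neg hm]
      have hnot : i ∉ pvBScan rest ks (i+1) p acc := by
        intro hmem
        rcases mem_pvBScan rest ks (i+1) p acc i hmem with h | h
        · exact absurd (hacc i h) (lt_irrefl i)
        · omega
      have hcon : PySem.Set.contains (pvBScan rest ks (i+1) p acc) i = false := by
        rw [← Bool.not_eq_true]
        intro hc
        exact hnot ((PySem.Set.contains_iff _ _).mp hc)
      simp only [hcon, Bool.false_eq_true, if_false]
      rw [ih (i+1) p acc (by intro j hj; exact lt_trans (hacc j hj) (by omega))]
      cases hdp : ks.drop p with
      | nil => rw [pvRem_nil_right, pvRem_nil_right]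
      | cons d ds =>
        have hk' : p < ks.length := by
          by_contra hge
          rw [List.drop_eq_nil_of_le (by omega)] at hdp
          simp at hdp
        have hd : d = ks[p] := by
          rw [List.drop_eq_getElem_cons hk'] at hdp
          exact (List.cons.injEq _ _ _ _ ▸ hdp).1.symm
        have hne : c ≠ d := by
          intro hcd
          exact hm ⟨hk', by rw [List.getD_eq_getElem _ _ hk', ← hd, ← hcd]⟩
        rw [pvRem, if_neg hne]

-- ===== VERDICT (by name: the statement is the Claim_ definition above) =====
theorem solution_spec : Claim_equal_solution := by
  intro m k _
  unfold Spec_solution solution solution_alt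
  dsimp only
  rw [pvALoop_eq, pvBScan_filter m.toList k.toList 0 0 PySem.Set.empty (by simp [PySem.Set.empty])]
  simp
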